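-- pv_equiv track=rewrite | github.com/dplocki/aquaQ-challenge | solutions/challenge35.py | calculate
-- ===== SOURCE A (Python) =====
-- def calculate(word: str):
--     result = []
--     memory = {}
--     for letter in word:
--         value_for_letter = sum(1 for l in word if letter > l) + memory.get(letter, 0)
--         memory[letter] = memory.get(letter, 0) + 1
--         result.append(value_for_letter)
--
--     return tuple(result)
-- ===== SOURCE B (Python) =====
-- def calculate(word: str):
--     # One counting pass + per-distinct-char "chars less than" table + occurrence
--     # counter: O(n + s^2) for s distinct chars instead of A's O(n^2).
--     freq = {}
--     for ch in word:
--         freq[ch] = freq.get(ch, 0) + 1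
--     less = {c: sum(n for d, n in freq.items() if d < c) for c in freq}
--     seen = {}
--     result = []
--     for ch in word:
--         k = seen.get(ch, 0)
--         result.append(less[ch] + k)
--         seen[ch] = k + 1
--     return tuple(result)
-- ===== Notes on version B (the rewrite author's own statement) =====
-- stated objective: faster
-- what changed: Instead of rescanning the whole word for every position, B builds a frequency dict in one pass, computes the chars-less-than value once per distinct character from the frequency items, and emits ranks in a single pass with an occurrence counter: O(n + s^2) for s distinct characters vs A's O(n^2).
import Mathlib
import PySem

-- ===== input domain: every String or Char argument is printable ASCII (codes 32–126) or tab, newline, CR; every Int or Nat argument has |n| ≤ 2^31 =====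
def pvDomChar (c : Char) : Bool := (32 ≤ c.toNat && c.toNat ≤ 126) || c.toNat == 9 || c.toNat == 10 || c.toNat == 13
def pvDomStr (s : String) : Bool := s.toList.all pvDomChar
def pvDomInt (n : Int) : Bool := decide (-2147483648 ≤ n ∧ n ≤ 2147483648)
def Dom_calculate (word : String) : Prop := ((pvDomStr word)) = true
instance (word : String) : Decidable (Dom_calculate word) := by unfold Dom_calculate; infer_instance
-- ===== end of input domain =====

-- B replaces A's per-position scan of the whole word by one frequency pass, a
-- per-distinct-char chars-less-than table, and an occurrence counter.

-- ===== PORT A =====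
def calculate (word : String) : List Int :=
  let ws := word.toList
  let st := ws.foldl (fun (st : List Int × PySem.Dict Char Int) letter =>
      let v := ws.foldl (fun s l => if letter > l then s + 1 else s) 0 + st.2.getD letter 0
      (st.1 ++ [v], st.2.insert letter (st.2.getD letter 0 + 1))) ([], PySem.Dict.empty)
  st.1

-- ===== PORT B =====
def calculate_alt (word : String) : List Int :=
  let ws := word.toList
  let freq := ws.foldl (fun d ch => d.insert ch (d.getD ch 0 + 1)) PySem.Dict.empty
  let less := freq.keys.foldl (fun d c =>
      d.insert c (freq.items.foldl (fun s p => if p.1 < c then s + p.2 else s) 0)) PySem.Dict.empty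
  -- less[ch]: exact as (get? ch).getD 0 — ch ∈ word so ch is always a key of less, no KeyError
  let st := ws.foldl (fun (st : PySem.Dict Char Int × List Int) ch =>
      let k := st.1.getD ch 0
      (st.1.insert ch (k + 1), st.2 ++ [(less.get? ch).getD 0 + k])) (PySem.Dict.empty, [])
  st.2

-- ===== PRECONDITION & SPEC =====
def Spec_calculate (word : String) (out : List Int) : Prop := out = calculate_alt word
instance (word : String) (out : List Int) : Decidable (Spec_calculate word out) := by unfold Spec_calculate; infer_instance

-- ===== CLAIM (what is proved, stated in full; the proofs are below) =====
def Claim_equal_calculate : Prop := ∀ (word : String), Dom_calculate word → Spec_calculate word (calculate word)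

-- ===== LEMMAS AND PROOFS =====

/-- Reference result: for each char, count of chars of `full` below it plus
number of previous occurrences (tracked by `prev`). -/
def pvRef (full : List Char) : List Char → List Char → List Int
  | [], _ => []
  | c :: rest, prev =>
      ((full.countP (fun l => c > l) : Int) + prev.count c) :: pvRef full rest (prev ++ [c])

theorem pvA_loop (full : List Char) (ws : List Char) : ∀ (acc : List Int) (mem : PySem.Dict Char Int)
    (prev : List Char), (∀ c, mem.getD c 0 = (prev.count c : Int)) →
    (ws.foldl (fun (st : List Int × PySem.Dict Char Int) letter =>
      (st.1 ++ [full.foldl (fun s l => if letter > l then s + 1 else s) 0 + st.2.getD letter 0],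
       st.2.insert letter (st.2.getD letter 0 + 1))) (acc, mem)).1
      = acc ++ pvRef full ws prev := by
  induction ws with
  | nil => intro acc mem prev _; simp [pvRef]
  | cons c rest ih =>
    intro acc mem prev hmem
    simp only [List.foldl_cons, pvRef]
    rw [ih (acc ++ [_]) _ (prev ++ [c])]
    · rw [PySem.List.foldl_ite_add_one, hmem]
      simp
    · intro c'
      rw [PySem.Dict.getD_insert]
      rcases eq_or_ne c' c with h | h
      · subst h; simp [hmem, List.count_append]
      · simp [h, h.symm, hmem, List.count_append]

theorem pvB_loop (full : List Char) (L : PySem.Dict Char Int) (ws : List Char)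
    (hL : ∀ c ∈ ws, (L.get? c).getD 0 = (full.countP (fun l => c > l) : Int)) :
    ∀ (acc : List Int) (seen : PySem.Dict Char Int) (prev : List Char),
    (∀ c, seen.getD c 0 = (prev.count c : Int)) →
    (ws.foldl (fun (st : PySem.Dict Char Int × List Int) ch =>
      (st.1.insert ch (st.1.getD ch 0 + 1), st.2 ++ [(L.get? ch).getD 0 + st.1.getD ch 0]))
      (seen, acc)).2 = acc ++ pvRef full ws prev := by
  induction ws with
  | nil => intro acc seen prev _; simp [pvRef]
  | cons c rest ih =>
    intro acc seen prev hseen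
    simp only [List.foldl_cons, pvRef]
    rw [ih (fun c' hc' => hL c' (List.mem_cons_of_mem _ hc')) (acc ++ [_]) _ (prev ++ [c])]
    · rw [hL c List.mem_cons_self, hseen]
      simp
    · intro c'
      rw [PySem.Dict.getD_insert]
      rcases eq_or_ne c' c with h | h
      · subst h; simp [hseen, List.count_append]
      · simp [h, h.symm, hseen, List.count_append]

/-- Sum of counts of the distinct chars below `c` equals the number of chars below `c`. -/
theorem pvSum_counts (ws : List Char) (c : Char) :
    (((PySem.Set.ofList ws).filter (fun d => decide (d < c))).map (fun d => (ws.count d : Int))).sum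
      = (ws.countP (fun l => c > l) : Int) := by
  have hperm : (PySem.Set.ofList ws).Perm ws.dedup := by
    rw [List.perm_ext_iff_of_nodup (PySem.Set.nodup_ofList ws) ws.nodup_dedup]
    intro a; rw [PySem.Set.mem_ofList, List.mem_dedup]
  rw [((hperm.filter (fun d => decide (d < c))).map (fun d => (ws.count d : Int))).sum_eq]
  have hcast : ((ws.dedup.filter (fun d => decide (d < c))).map (fun d => (ws.count d : Int))).sum
      = (((ws.dedup.filter (fun d => decide (d < c))).map (fun d => ws.count d)).sum : Int) := by
    rw [Nat.cast_list_sum, List.map_map]; rfl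
  rw [hcast, List.sum_map_count_dedup_filter_eq_countP (fun d => decide (d < c)) ws]

/-- Looking up a key of a table built by inserting `G c'` for each `c'` of a
duplicate-free key list gives `G c`. -/
theorem pvTable_lookup (G : Char → Int) (ks : List Char) (hnd : ks.Nodup) (c : Char)
    (hc : c ∈ ks) :
    ((ks.foldl (fun d c' => d.insert c' (G c')) PySem.Dict.empty).get? c).getD 0 = G c := by
  have hitems := PySem.Dict.items_foldl_insert_fresh ks (fun a => a) G PySem.Dict.empty
    (fun a _ => PySem.Dict.contains_empty a) (by simpa using hnd)
  have hnodup : (ks.foldl (fun d c' => d.insert c' (G c')) PySem.Dict.empty).keys.Nodup := by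
    apply PySem.Dict.nodup_keys_foldl_insert
    rw [PySem.Dict.keys_empty]; exact List.nodup_nil
  have hmem : (c, G c) ∈ (ks.foldl (fun d c' => d.insert c' (G c')) PySem.Dict.empty).items := by
    simp only at hitems
    rw [hitems]
    exact List.mem_append_right _ (List.mem_map_of_mem hc)
  rw [PySem.Dict.get?_of_mem_items _ hmem hnodup]
  rfl

/-- The `less` table built by B answers "count of chars of ws below c" for every c ∈ ws. -/
theorem pvLess_lookup (ws : List Char) (c : Char) (hc : c ∈ ws) :
    ((((ws.foldl (fun d ch => d.insert ch (d.getD ch 0 + 1))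
          (PySem.Dict.empty : PySem.Dict Char Int)).keys).foldl
        (fun d c' => d.insert c'
          ((ws.foldl (fun d ch => d.insert ch (d.getD ch 0 + 1))
              (PySem.Dict.empty : PySem.Dict Char Int)).items.foldl
            (fun s p => if p.1 < c' then s + p.2 else s) (0 : Int)))
        PySem.Dict.empty).get? c).getD 0 = (ws.countP (fun l => c > l) : Int) := by
  rw [PySem.Dict.foldl_insert_getD_add_one_eq_counter,
      pvTable_lookup _ _ (by rw [PySem.Dict.keys_counter]; exact PySem.Set.nodup_ofList ws) c
        (by rw [PySem.Dict.keys_counter, PySem.Set.mem_ofList]; exact hc),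
      PySem.Dict.items_counter, List.foldl_map, PySem.List.foldl_ite_eq_foldl_filter,
      PySem.List.foldl_add]
  simpa using pvSum_counts ws c

-- ===== VERDICT (by name: the statement is the Claim_ definition above) =====
theorem calculate_spec : Claim_equal_calculate := by
  intro word _
  show calculate word = calculate_alt word
  have hA := pvA_loop word.toList word.toList [] PySem.Dict.empty []
    (fun c => by simp)
  have hB := pvB_loop word.toList _ word.toList (fun c hc => pvLess_lookup word.toList c hc) []
    PySem.Dict.empty [] (fun c => by simp)
  simp only [List.nil_append] at hA hB
  exact hA.trans hB.symm
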